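-- pv_equiv track=rewrite | github.com/BertrandDungan/AdventOfCode | Day15/main.py | getIntersectsForAllPointsInLine
-- ===== SOURCE A (Python) =====
-- from typing import Generator, Literal, NamedTuple, TypeVar
--
-- ROW_POSITION = 10
--
-- Point = NamedTuple("Point", [("x", int), ("y", int)])
--
-- def pointsInLine(lineLength: int, minX: int, coordinate: int) -> list[Point]:
--     return [Point(line, lineLength) for line in range(minX, coordinate + 1)]
--
-- def getNumberOfIntersects(
--     pointsInLine: list[Point],
--     sensorAreaLines: list[Point],
-- ) -> int:
--     intersects = len(
--         [point for point in sensorAreaLines if point in pointsInLine and point]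
--     )
--     # if intersects == 2 and pointsInLine[-1] in sensorAreaLines:
--     #     return 3
--     return intersects
--
-- def isOdd(number: int) -> bool:
--     return number % 2 != 0
--
-- def getIntersectsForAllPointsInLine(
--     minX: int,
--     maxX: int,
--     sensorAreaLines: list[list[Point]],
--     beaconLocations: list[Point],
-- ):
--     non_empty_point_groups = [
--         pointGroup
--         for pointGroup in [
--             [
--                 sensorPoint
--                 for sensorPoint in sensorAreaGroup
--                 if sensorPoint[1] == ROW_POSITION
--             ]
--             for sensorAreaGroup in sensorAreaLines
--         ]
--         if len(pointGroup) > 0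
--     ]
--     for coordinate in range(minX, maxX):
--         if not (coordinate, ROW_POSITION) in beaconLocations:
--             linePoints = pointsInLine(ROW_POSITION, minX, coordinate)
--             for sensorArea in non_empty_point_groups:
--                 intersects = getNumberOfIntersects(linePoints, sensorArea)
--                 if isOdd(intersects):
--                     yield coordinate
--                     break
-- ===== SOURCE B (Python) =====
-- ROW_POSITION = 10
--
-- def getIntersectsForAllPointsInLine(minX, maxX, sensorAreaLines, beaconLocations):
--     # Build once: the set of row beacon x's, and a map from x to the indices of
--     # the sensor groups whose intersection parity toggles at x (x's occurring an
--     # odd number of times on the row in that group).  Then sweep c over the range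
--     # keeping one parity bit per group and a count of currently-odd groups.
--     beaconXs = {x for x, y in beaconLocations if y == ROW_POSITION}
--     tog = {}
--     for gi, group in enumerate(sensorAreaLines):
--         occ = {}
--         for x, y in group:
--             if y == ROW_POSITION:
--                 occ[x] = occ.get(x, 0) + 1
--         for x, k in occ.items():
--             if k % 2 == 1:
--                 tog[x] = tog.get(x, []) + [gi]
--     parities = [False] * len(sensorAreaLines)
--     nOdd = 0
--     for c in range(minX, maxX):
--         for gi in tog.get(c, []):
--             parities[gi] = not parities[gi]
--             nOdd += 1 if parities[gi] else -1
--         if nOdd > 0 and c not in beaconXs: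
--             yield c
-- ===== Notes on version B (the rewrite author's own statement) =====
-- stated objective: alternative
-- what changed: Instead of rebuilding a linePoints list for every coordinate and counting intersections by membership scans over it, B indexes once, per x, which sensor groups change intersection parity there (row-10 x's with odd multiplicity) plus the set of row beacon x's, and sweeps the range maintaining one parity bit per group and a count of odd groups.
import Mathlib
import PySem

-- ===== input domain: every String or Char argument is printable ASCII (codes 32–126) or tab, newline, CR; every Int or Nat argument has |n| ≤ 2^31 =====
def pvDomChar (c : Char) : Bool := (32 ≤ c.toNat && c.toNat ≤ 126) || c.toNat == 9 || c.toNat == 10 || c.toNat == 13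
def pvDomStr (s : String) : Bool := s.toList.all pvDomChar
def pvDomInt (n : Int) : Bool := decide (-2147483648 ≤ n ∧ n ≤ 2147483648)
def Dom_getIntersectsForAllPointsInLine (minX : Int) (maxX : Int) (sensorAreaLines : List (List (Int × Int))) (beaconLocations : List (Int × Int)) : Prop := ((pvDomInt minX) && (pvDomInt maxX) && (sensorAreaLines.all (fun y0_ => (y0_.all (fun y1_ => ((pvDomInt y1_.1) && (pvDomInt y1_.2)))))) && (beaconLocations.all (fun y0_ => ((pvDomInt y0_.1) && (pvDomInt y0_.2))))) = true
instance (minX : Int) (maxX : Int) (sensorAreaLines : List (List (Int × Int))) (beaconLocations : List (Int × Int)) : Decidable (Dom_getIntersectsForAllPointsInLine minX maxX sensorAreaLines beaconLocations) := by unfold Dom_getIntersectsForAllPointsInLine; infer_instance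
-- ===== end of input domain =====

-- B replaces A's per-coordinate linePoints list and membership scans by a toggle-point index
-- (x -> groups whose parity flips at x) built once, then a running-parity sweep over the range
-- (objective: alternative).

-- ===== PORT A =====
-- pointsInLine
def pointsInLinePort (lineLength : Int) (minX : Int) (coordinate : Int) : List (Int × Int) :=
  (PySem.List.pyRange minX (coordinate + 1) 1).map (fun line => (line, lineLength))

-- getNumberOfIntersects ('point in pointsInLine and point': a 2-tuple is always truthy)
def getNumberOfIntersectsPort (pointsInLine : List (Int × Int)) (sensorAreaLines : List (Int × Int)) : Int :=
  ((sensorAreaLines.filter (fun point => decide (point ∈ pointsInLine))).length : Int)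

-- isOdd
def isOddPort (number : Int) : Bool := decide (PySem.Int.mod number 2 ≠ 0)

-- generator: the yielded coordinates collected in order
def getIntersectsForAllPointsInLine (minX : Int) (maxX : Int) (sensorAreaLines : List (List (Int × Int))) (beaconLocations : List (Int × Int)) : List Int :=
  let nonEmptyPointGroups :=
    (sensorAreaLines.map (fun sensorAreaGroup =>
        sensorAreaGroup.filter (fun sensorPoint => decide (sensorPoint.2 = 10)))).filter
      (fun pointGroup => decide (pointGroup.length > 0))
  (PySem.List.pyRange minX maxX 1).foldl (fun acc coordinate =>
    if decide ((coordinate, (10 : Int)) ∈ beaconLocations) then acc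
    else
      let linePoints := pointsInLinePort 10 minX coordinate
      -- inner 'for sensorArea …: if isOdd: yield coordinate; break' = first odd group yields once
      if nonEmptyPointGroups.any (fun sensorArea =>
          isOddPort (getNumberOfIntersectsPort linePoints sensorArea)) then acc ++ [coordinate]
      else acc) []

-- ===== PORT B =====
def getIntersectsForAllPointsInLine_alt (minX : Int) (maxX : Int) (sensorAreaLines : List (List (Int × Int))) (beaconLocations : List (Int × Int)) : List Int :=
  let beaconXs : PySem.Set Int :=
    PySem.Set.ofList ((beaconLocations.filter (fun p => decide (p.2 = 10))).map (fun p => p.1))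
  let tog : PySem.Dict Int (List Int) :=
    (PySem.List.enumerate sensorAreaLines).foldl (fun tg eg =>
      let occ := eg.2.foldl (fun occ p =>
        if p.2 = 10 then occ.modify p.1 0 (· + 1) else occ) PySem.Dict.empty
      occ.items.foldl (fun tg2 xk =>
        if PySem.Int.mod xk.2 2 = 1 then tg2.modify xk.1 [] (· ++ [eg.1]) else tg2) tg)
      PySem.Dict.empty
  let parities : List Bool := List.replicate sensorAreaLines.length false
  ((PySem.List.pyRange minX maxX 1).foldl (fun st c =>
      -- every gi in tog's lists is a valid index into parities by construction, so pyGetD/pySetD are exact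
      let pn := (tog.getD c []).foldl (fun pn gi =>
        let newp := !(PySem.List.pyGetD pn.1 gi false)
        (PySem.List.pySetD pn.1 gi newp, pn.2 + if newp then (1 : Int) else -1)) (st.1, st.2.1)
      (pn.1, pn.2, if decide (0 < pn.2) && !(PySem.Set.contains beaconXs c) then st.2.2 ++ [c] else st.2.2))
    (parities, (0 : Int), ([] : List Int))).2.2

-- ===== PRECONDITION & SPEC =====
def Spec_getIntersectsForAllPointsInLine (minX : Int) (maxX : Int) (sensorAreaLines : List (List (Int × Int))) (beaconLocations : List (Int × Int)) (out : List Int) : Prop := out = getIntersectsForAllPointsInLine_alt minX maxX sensorAreaLines beaconLocations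
instance (minX : Int) (maxX : Int) (sensorAreaLines : List (List (Int × Int))) (beaconLocations : List (Int × Int)) (out : List Int) : Decidable (Spec_getIntersectsForAllPointsInLine minX maxX sensorAreaLines beaconLocations out) := by unfold Spec_getIntersectsForAllPointsInLine; infer_instance

-- ===== CLAIM (what is proved, stated in full; the proofs are below) =====
def Claim_equal_getIntersectsForAllPointsInLine : Prop := ∀ (minX : Int) (maxX : Int) (sensorAreaLines : List (List (Int × Int))) (beaconLocations : List (Int × Int)), Dom_getIntersectsForAllPointsInLine minX maxX sensorAreaLines beaconLocations → Spec_getIntersectsForAllPointsInLine minX maxX sensorAreaLines beaconLocations (getIntersectsForAllPointsInLine minX maxX sensorAreaLines beaconLocations)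

-- ===== LEMMAS AND PROOFS =====

-- named copies of the two fold bodies and builders (definitionally the ports' code)
def bXs (beaconLocations : List (Int × Int)) : PySem.Set Int :=
  PySem.Set.ofList ((beaconLocations.filter (fun p => decide (p.2 = 10))).map (fun p => p.1))

def occD (g : List (Int × Int)) : PySem.Dict Int Int :=
  g.foldl (fun occ p => if p.2 = 10 then occ.modify p.1 0 (· + 1) else occ) PySem.Dict.empty

def togD (sal : List (List (Int × Int))) : PySem.Dict Int (List Int) :=
  (PySem.List.enumerate sal).foldl (fun tg eg =>
    (occD eg.2).items.foldl (fun tg2 xk =>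
      if PySem.Int.mod xk.2 2 = 1 then tg2.modify xk.1 [] (· ++ [eg.1]) else tg2) tg)
    PySem.Dict.empty

def stepA (minX : Int) (sensorAreaLines : List (List (Int × Int))) (beaconLocations : List (Int × Int)) (acc : List Int) (coordinate : Int) : List Int :=
  if decide ((coordinate, (10 : Int)) ∈ beaconLocations) then acc
  else
    let linePoints := pointsInLinePort 10 minX coordinate
    if ((sensorAreaLines.map (fun sensorAreaGroup =>
          sensorAreaGroup.filter (fun sensorPoint => decide (sensorPoint.2 = 10)))).filter
        (fun pointGroup => decide (pointGroup.length > 0))).any (fun sensorArea =>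
        isOddPort (getNumberOfIntersectsPort linePoints sensorArea)) then acc ++ [coordinate]
    else acc

def stepB (tog : PySem.Dict Int (List Int)) (beaconXs : PySem.Set Int) (st : List Bool × Int × List Int) (c : Int) : List Bool × Int × List Int :=
  let pn := (tog.getD c []).foldl (fun pn gi =>
    let newp := !(PySem.List.pyGetD pn.1 gi false)
    (PySem.List.pySetD pn.1 gi newp, pn.2 + if newp then (1 : Int) else -1)) (st.1, st.2.1)
  (pn.1, pn.2, if decide (0 < pn.2) && !(PySem.Set.contains beaconXs c) then st.2.2 ++ [c] else st.2.2)

-- row-10 points of a group, their x's, the window count, its parity bit, the toggle test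
def rowF (g : List (Int × Int)) : List (Int × Int) := g.filter (fun p => decide (p.2 = 10))
def xsG (g : List (Int × Int)) : List Int := (rowF g).map (fun p => p.1)
def cntW (minX c : Int) (g : List (Int × Int)) : Nat :=
  (rowF g).countP (fun p => decide (minX ≤ p.1 ∧ p.1 ≤ c))
def Pb (minX c : Int) (g : List (Int × Int)) : Bool := cntW minX c g % 2 == 1
def togAt (c : Int) (g : List (Int × Int)) : Bool := ((rowF g).countP (fun p => p.1 == c)) % 2 == 1

-- beacon set membership agrees with A's tuple membership test
theorem beacon_contains_eq (beaconLocations : List (Int × Int)) (c : Int) :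
    PySem.Set.contains (bXs beaconLocations) c = decide ((c, (10 : Int)) ∈ beaconLocations) := by
  have h : (c ∈ (beaconLocations.filter (fun p => decide (p.2 = 10))).map (fun p => p.1)) ↔
      ((c, (10 : Int)) ∈ beaconLocations) := by
    simp only [List.mem_map, List.mem_filter, decide_eq_true_eq]
    constructor
    · rintro ⟨⟨a, b⟩, ⟨hmem, hb⟩, rfl⟩
      simp only at hb
      subst hb
      exact hmem
    · intro hmem
      exact ⟨(c, 10), ⟨hmem, rfl⟩, rfl⟩
  unfold bXs
  by_cases hc : (c, (10 : Int)) ∈ beaconLocations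
  · rw [decide_eq_true hc]
    exact (PySem.Set.contains_iff _ _).mpr ((PySem.Set.mem_ofList _ _).mpr (h.mpr hc))
  · rw [decide_eq_false hc]
    exact Bool.eq_false_iff.mpr
      (fun ht => hc (h.mp ((PySem.Set.mem_ofList _ _).mp ((PySem.Set.contains_iff _ _).mp ht))))

-- isOdd on a nonnegative count is the parity bit
theorem isOdd_natCast (k : Nat) : isOddPort (k : Int) = (k % 2 == 1) := by
  unfold isOddPort
  rw [PySem.Int.mod_eq_emod_of_pos (by omega)]
  have hcast : ((k : Int) % 2) = ((k % 2 : Nat) : Int) := by push_cast; rfl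
  rw [hcast]
  rcases Nat.mod_two_eq_zero_or_one k with h | h <;> simp [h]

-- membership in linePoints is the arithmetic window condition (on row-10 points)
theorem mem_linePoints (minX c : Int) (p : Int × Int) (hp : p.2 = 10) :
    decide (p ∈ pointsInLinePort 10 minX c) = decide (minX ≤ p.1 ∧ p.1 ≤ c) := by
  unfold pointsInLinePort
  rcases p with ⟨a, b⟩
  simp only at hp
  subst hp
  simp only [List.mem_map, PySem.List.mem_pyRange_one, decide_eq_decide]
  constructor
  · rintro ⟨line, ⟨h1, h2⟩, heq⟩
    have : line = a := by exact congrArg Prod.fst heq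
    omega
  · intro ⟨h1, h2⟩
    exact ⟨a, ⟨h1, by omega⟩, rfl⟩

-- per-group: A's nonempty-guarded odd-intersect test equals the window-parity bit
theorem group_eq (minX c : Int) (g : List (Int × Int)) :
    ((fun pg => decide (pg.length > 0)) (g.filter (fun p => decide (p.2 = 10)))
      && isOddPort (getNumberOfIntersectsPort (pointsInLinePort 10 minX c)
            (g.filter (fun p => decide (p.2 = 10)))))
    = Pb minX c g := by
  have hmem : ∀ p ∈ g.filter (fun p => decide (p.2 = 10)), p.2 = 10 := by
    intro p hp
    rw [List.mem_filter] at hp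
    exact of_decide_eq_true hp.2
  unfold Pb cntW rowF getNumberOfIntersectsPort
  rw [List.filter_congr (fun p hp => mem_linePoints minX c p (hmem p hp))]
  rw [show (((g.filter (fun p => decide (p.2 = 10))).filter
        (fun p => decide (minX ≤ p.1 ∧ p.1 ≤ c))).length : Int)
      = (((g.filter (fun p => decide (p.2 = 10))).countP
          (fun p => decide (minX ≤ p.1 ∧ p.1 ≤ c)) : Nat) : Int) from by
    rw [List.countP_eq_length_filter]]
  rw [isOdd_natCast]
  cases hpgc : g.filter (fun p => decide (p.2 = 10)) with
  | nil => simp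
  | cons q t => simp

-- A's inner any over nonempty groups is 'some group has odd window parity'
theorem condA_eq (minX c : Int) (sal : List (List (Int × Int))) :
    ((sal.map (fun sensorAreaGroup =>
        sensorAreaGroup.filter (fun sensorPoint => decide (sensorPoint.2 = 10)))).filter
      (fun pointGroup => decide (pointGroup.length > 0))).any (fun sensorArea =>
        isOddPort (getNumberOfIntersectsPort (pointsInLinePort 10 minX c) sensorArea))
    = sal.any (fun g => Pb minX c g) := by
  rw [List.any_filter, List.any_map]
  congr 1
  funext g
  simp only [Function.comp_apply]
  exact group_eq minX c g

-- the occurrence dict is the counter of the group's row-10 x's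
theorem occD_eq_counter (g : List (Int × Int)) : occD g = PySem.Dict.counter (xsG g) := by
  unfold occD xsG rowF
  have hstep : ∀ (l : List (Int × Int)) (d : PySem.Dict Int Int),
      l.foldl (fun occ p => if p.2 = 10 then occ.modify p.1 0 (· + 1) else occ) d
        = (l.filter (fun p => decide (p.2 = 10))).foldl
            (fun occ p => occ.modify p.1 0 (· + 1)) d := by
    intro l
    induction l with
    | nil => intro d; rfl
    | cons q t ih => intro d; by_cases hq : q.2 = 10 <;> simp [hq, ih]
  rw [hstep, PySem.Dict.counter_eq_foldl, List.foldl_map]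

-- extending the window by one coordinate adds exactly the points at that coordinate
theorem cntW_step (minX c : Int) (hc : minX ≤ c) (g : List (Int × Int)) :
    cntW minX c g = cntW minX (c - 1) g + (rowF g).countP (fun p => p.1 == c) := by
  unfold cntW
  induction rowF g with
  | nil => simp
  | cons q t ih =>
    simp only [List.countP_cons]
    rw [ih]
    by_cases h1 : q.1 = c
    · have hb : (q.1 == c) = true := by simp [h1]
      have hc2 : decide (minX ≤ q.1 ∧ q.1 ≤ c) = true := by
        subst h1
        simp only [decide_eq_true_eq]
        omega
      have hc3 : decide (minX ≤ q.1 ∧ q.1 ≤ c - 1) = false := by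
        subst h1
        simp only [decide_eq_false_iff_not]
        omega
      simp [hb, hc2]
      rw [if_neg (by omega : ¬(minX ≤ q.1 ∧ q.1 < c))]
      omega
    · have hb : (q.1 == c) = false := by simp [h1]
      have heq : decide (minX ≤ q.1 ∧ q.1 ≤ c) = decide (minX ≤ q.1 ∧ q.1 ≤ c - 1) := by
        rw [decide_eq_decide]
        omega
      simp [hb, heq]
      split_ifs <;> omega

-- generic: the conditional append-fold's entry at c collects one gi per matching pair
theorem gen1 (c gi : Int) : ∀ (l : List (Int × Int)) (tg : PySem.Dict Int (List Int)),
    (l.foldl (fun tg2 xk =>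
        if PySem.Int.mod xk.2 2 = 1 then tg2.modify xk.1 [] (· ++ [gi]) else tg2) tg).getD c []
      = tg.getD c []
          ++ (l.filter (fun xk => decide (PySem.Int.mod xk.2 2 = 1) && (xk.1 == c))).map (fun _ => gi) := by
  intro l
  induction l with
  | nil => intro tg; simp
  | cons q t ih =>
    intro tg
    simp only [List.foldl_cons, List.filter_cons]
    by_cases h1 : PySem.Int.mod q.2 2 = 1
    · by_cases h2 : q.1 = c
      · have hcond : (decide (PySem.Int.mod q.2 2 = 1) && (q.1 == c)) = true := by
          rw [decide_eq_true h1, Bool.true_and]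
          simp [h2]
        rw [if_pos h1, ih, hcond, if_pos rfl]
        have hmod : (tg.modify q.1 [] (· ++ [gi])).getD c [] = tg.getD c [] ++ [gi] := by
          rw [PySem.Dict.getD_modify, if_pos h2.symm, h2]
        rw [hmod, List.map_cons, List.append_assoc, List.singleton_append]
      · have hcond : (decide (PySem.Int.mod q.2 2 = 1) && (q.1 == c)) = false := by
          rw [decide_eq_true h1, Bool.true_and]
          simp [h2]
        rw [if_pos h1, ih, hcond, if_neg Bool.false_ne_true]
        have hmod : (tg.modify q.1 [] (· ++ [gi])).getD c [] = tg.getD c [] := by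
          rw [PySem.Dict.getD_modify, if_neg (fun h => h2 h.symm)]
        rw [hmod]
    · have hcond : (decide (PySem.Int.mod q.2 2 = 1) && (q.1 == c)) = false := by
        rw [decide_eq_false h1, Bool.false_and]
      rw [if_neg h1, ih, hcond, if_neg Bool.false_ne_true]

-- a nodup list filtered by 'matches c and q' is the singleton [c] or empty
theorem nodup_filter_single (c : Int) (q : Int → Bool) :
    ∀ l : List Int, l.Nodup →
      l.filter (fun k => q k && (k == c)) = if c ∈ l ∧ q c = true then [c] else [] := by
  intro l
  induction l with
  | nil => simp
  | cons a t ih =>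
    intro hn
    rw [List.nodup_cons] at hn
    simp only [List.filter_cons]
    by_cases ha : a = c
    · have hb : (a == c) = true := by simp [ha]
      have hnot : ¬ (c ∈ t ∧ q c = true) := fun hx => hn.1 (ha ▸ hx.1)
      rw [ih hn.2, if_neg hnot]
      by_cases hq : q c = true
      · have hqa : q a = true := by rw [ha]; exact hq
        rw [hqa, Bool.true_and, hb, if_pos rfl,
          if_pos ⟨by rw [← ha]; exact List.mem_cons_self, hq⟩]
        rw [ha]
      · have hqa : q a = false := by rw [ha]; simpa using hq
        rw [hqa, Bool.false_and, if_neg Bool.false_ne_true,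
          if_neg (fun hx : c ∈ a :: t ∧ q c = true => hq hx.2)]
    · have hb : (a == c) = false := by simp [ha]
      rw [ih hn.2]
      have hmem : (c ∈ a :: t ∧ q c = true) ↔ (c ∈ t ∧ q c = true) := by
        constructor
        · rintro ⟨hm, hq⟩
          rcases List.mem_cons.mp hm with h | h
          · exact absurd h.symm ha
          · exact ⟨h, hq⟩
        · rintro ⟨hm, hq⟩
          exact ⟨List.mem_cons_of_mem a hm, hq⟩
      simp only [hb, Bool.and_false, Bool.false_eq_true, if_false, hmem]

-- one group contributes its index at exactly its odd-multiplicity x's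
theorem items_sing (g : List (Int × Int)) (c : Int) :
    (occD g).items.filter (fun xk => decide (PySem.Int.mod xk.2 2 = 1) && (xk.1 == c))
      = if togAt c g then [(c, (((xsG g).count c : Nat) : Int))] else [] := by
  rw [occD_eq_counter, PySem.Dict.items_counter, List.filter_map]
  have hcomp : ((fun xk : Int × Int => decide (PySem.Int.mod xk.2 2 = 1) && (xk.1 == c)) ∘
      (fun k : Int => (k, ((List.count k (xsG g) : Nat) : Int))))
      = fun k => (decide (PySem.Int.mod ((List.count k (xsG g) : Nat) : Int) 2 = 1)) && (k == c) :=
    rfl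
  rw [hcomp, nodup_filter_single c _ _ (PySem.Set.nodup_ofList _)]
  have hcount : List.count c (xsG g) = (rowF g).countP (fun p => p.1 == c) := by
    rw [List.count_eq_countP]
    unfold xsG
    rw [List.countP_map]
    rfl
  have hmod : (PySem.Int.mod ((List.count c (xsG g) : Nat) : Int) 2 = 1)
      ↔ (List.count c (xsG g) % 2 = 1) := by
    rw [PySem.Int.mod_eq_emod_of_pos (by omega : (0:Int) < 2)]
    omega
  by_cases ht : togAt c g = true
  · have hodd : (rowF g).countP (fun p => p.1 == c) % 2 = 1 := by
      have := ht
      unfold togAt at this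
      simpa using this
    have hco : List.count c (xsG g) % 2 = 1 := by rw [hcount]; exact hodd
    have hmem : c ∈ PySem.Set.ofList (xsG g) := by
      rw [PySem.Set.mem_ofList]
      have : 0 < List.count c (xsG g) := by omega
      exact List.count_pos_iff.mp this
    rw [if_pos ⟨hmem, decide_eq_true (hmod.mpr hco)⟩, if_pos ht]
    rfl
  · have hnodd : ¬ ((rowF g).countP (fun p => p.1 == c) % 2 = 1) := by
      intro hx
      exact ht (by unfold togAt; simpa using hx)
    have hq : decide (PySem.Int.mod ((List.count c (xsG g) : Nat) : Int) 2 = 1) = false := by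
      rw [decide_eq_false]
      intro hx
      exact hnodd (by rw [← hcount]; exact hmod.mp hx)
    rw [if_neg (fun hx => by rw [hq] at hx; exact Bool.false_ne_true hx.2), if_neg ht]
    rfl

-- the toggle dict at c lists, in order, the indices of the groups toggling at c
theorem tog_getD (c : Int) : ∀ (egs : List (Int × List (Int × Int))) (tg : PySem.Dict Int (List Int)),
    (egs.foldl (fun tg eg =>
        (occD eg.2).items.foldl (fun tg2 xk =>
          if PySem.Int.mod xk.2 2 = 1 then tg2.modify xk.1 [] (· ++ [eg.1]) else tg2) tg) tg).getD c []
      = tg.getD c [] ++ (egs.filter (fun eg => togAt c eg.2)).map (fun eg => eg.1) := by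
  intro egs
  induction egs with
  | nil => intro tg; simp
  | cons eg t ih =>
    intro tg
    simp only [List.foldl_cons, List.filter_cons]
    rw [ih, gen1 c eg.1 (occD eg.2).items tg, items_sing]
    by_cases htog : togAt c eg.2 = true
    · rw [if_pos htog, if_pos htog, List.map_cons, List.map_cons]
      simp [List.append_assoc]
    · have hf : togAt c eg.2 = false := by simpa using htog
      rw [hf]
      simp

theorem gis_char (sal : List (List (Int × Int))) (c : Int) :
    (togD sal).getD c []
      = (PySem.List.pyRange 0 (sal.length : Int) 1).filter
          (fun j => togAt c (PySem.List.pyGetD sal j [])) := by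
  unfold togD
  rw [tog_getD c (PySem.List.enumerate sal) PySem.Dict.empty,
    PySem.Dict.getD_empty, List.nil_append,
    PySem.List.enumerate_eq_map_pyRange sal ([] : List (Int × Int)),
    List.filter_map, List.map_map]
  have hlen : PySem.List.len sal = (sal.length : Int) := by simp [PySem.List.len]
  rw [hlen]
  have hcomp : ((fun eg : Int × List (Int × Int) => eg.1) ∘
      (fun j => (j, PySem.List.pyGetD sal j []))) = fun j => j := rfl
  rw [hcomp, List.map_id']
  rfl

-- crossing c toggles exactly the groups with odd multiplicity at c
theorem Pb_step (minX c : Int) (hc : minX ≤ c) (g : List (Int × Int)) :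
    Pb minX c g = if togAt c g then !(Pb minX (c - 1) g) else Pb minX (c - 1) g := by
  unfold Pb togAt
  rw [cntW_step minX c hc g]
  rcases Nat.mod_two_eq_zero_or_one ((rowF g).countP (fun p => p.1 == c)) with h | h <;>
    rcases Nat.mod_two_eq_zero_or_one (cntW minX (c - 1) g) with h2 | h2 <;>
      · have hadd : (cntW minX (c - 1) g + (rowF g).countP (fun p => p.1 == c)) % 2
            = (cntW minX (c - 1) g % 2 + (rowF g).countP (fun p => p.1 == c) % 2) % 2 :=
          Nat.add_mod _ _ 2
        simp [h, h2, hadd]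

-- setting one element adjusts the true-count by the old/new indicator difference
theorem countP_set_int (b : Bool) : ∀ (l : List Bool) (i : Nat), i < l.length →
    (((l.set i b).countP id : Nat) : Int)
      = ((l.countP id : Nat) : Int) - (if l.getD i false then 1 else 0) + (if b then 1 else 0) := by
  intro l
  induction l with
  | nil => intro i h; simp at h
  | cons a t ih =>
    intro i h
    cases i with
    | zero =>
      simp only [List.set_cons_zero, List.countP_cons, List.getD_cons_zero]
      cases a <;> cases b <;> simp
    | succ j =>
      have hj : j < t.length := by simpa using h
      simp only [List.set_cons_succ, List.countP_cons, List.getD_cons_succ]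
      push_cast
      rw [ih j hj]
      cases h3 : t.getD j false <;> cases a <;> cases b <;> simp

-- the parity-flip fold, stripped of the counter
def tglF (gis : List Int) (bs : List Bool) : List Bool :=
  gis.foldl (fun bs gi => bs.set gi.toNat (!(bs.getD gi.toNat false))) bs

theorem length_tglF (gis : List Int) : ∀ bs : List Bool, (tglF gis bs).length = bs.length := by
  induction gis with
  | nil => intro bs; rfl
  | cons g t ih =>
    intro bs
    rw [show tglF (g :: t) bs = tglF t (bs.set g.toNat (!(bs.getD g.toNat false))) from rfl, ih]
    exact List.length_set ..

theorem getElem_tglF : ∀ (gis : List Int) (bs : List Bool) (i : Nat) (h : i < (tglF gis bs).length),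
    gis.Nodup → (∀ gi ∈ gis, 0 ≤ gi ∧ gi < (bs.length : Int)) →
    (tglF gis bs)[i] = if ((i : Nat) : Int) ∈ gis then !(bs.getD i false) else bs.getD i false := by
  intro gis
  induction gis with
  | nil =>
    intro bs i h _ _
    have hi : i < bs.length := by simpa [tglF] using h
    rw [if_neg (by simp)]
    exact (List.getD_eq_getElem bs false hi).symm
  | cons gH t ih =>
    intro bs i h0 hnd hb
    have hg0 : 0 ≤ gH := (hb gH List.mem_cons_self).1
    have hglt : gH < (bs.length : Int) := (hb gH List.mem_cons_self).2
    have hgn : gH.toNat < bs.length := by omega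
    have hT : tglF (gH :: t) bs = tglF t (bs.set gH.toNat (!(bs.getD gH.toNat false))) := rfl
    have h : i < (tglF t (bs.set gH.toNat (!(bs.getD gH.toNat false)))).length := by
      rw [← hT]
      exact h0
    have hcast : (tglF (gH :: t) bs)[i]'h0
        = (tglF t (bs.set gH.toNat (!(bs.getD gH.toNat false))))[i]'h := rfl
    have hlen' : (bs.set gH.toNat (!(bs.getD gH.toNat false))).length = bs.length :=
      List.length_set
    have hi : i < bs.length := by
      have := h
      rw [length_tglF, hlen'] at this
      exact this
    rw [hcast, ih (bs.set gH.toNat (!(bs.getD gH.toNat false))) i h (List.Nodup.of_cons hnd)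
      (fun gi hgi => by
        have := hb gi (List.mem_cons_of_mem _ hgi)
        rw [hlen']
        exact this)]
    by_cases hig : ((i : Nat) : Int) = gH
    · have hnot : ((i : Nat) : Int) ∉ t := by
        rw [hig]
        exact (List.nodup_cons.mp hnd).1
      rw [if_neg hnot, if_pos (by rw [hig]; exact List.mem_cons_self)]
      have hgi : gH.toNat = i := by omega
      rw [List.getD_eq_getElem _ _ (by rw [List.length_set]; exact hi), List.getElem_set,
        if_pos hgi, hgi, List.getD_eq_getElem _ _ hi]
    · have hset : (bs.set gH.toNat (!(bs.getD gH.toNat false))).getD i false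
          = bs.getD i false := by
        rw [List.getD_eq_getElem _ _ (by rw [List.length_set]; exact hi), List.getElem_set,
          if_neg (by omega), List.getD_eq_getElem _ _ hi]
      rw [hset]
      have hmem : (((i : Nat) : Int) ∈ gH :: t) ↔ (((i : Nat) : Int) ∈ t) := by
        simp [List.mem_cons, hig]
      by_cases hm : ((i : Nat) : Int) ∈ t
      · rw [if_pos hm, if_pos (hmem.mpr hm)]
      · rw [if_neg hm, if_neg (fun hx => hm (hmem.mp hx))]

-- the inner fold tracks the flipped bits together with their true-count
theorem F_spec : ∀ (gis : List Int) (bs : List Bool), gis.Nodup →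
    (∀ gi ∈ gis, 0 ≤ gi ∧ gi < (bs.length : Int)) →
    gis.foldl (fun pn gi =>
        let newp := !(PySem.List.pyGetD pn.1 gi false)
        (PySem.List.pySetD pn.1 gi newp, pn.2 + if newp then (1 : Int) else -1))
      (bs, ((bs.countP id : Nat) : Int))
      = (tglF gis bs, (((tglF gis bs).countP id : Nat) : Int)) := by
  intro gis
  induction gis with
  | nil => intro bs _ _; rfl
  | cons gH t ih =>
    intro bs hnd hb
    have hg0 : 0 ≤ gH := (hb gH List.mem_cons_self).1
    have hgn : gH.toNat < bs.length := by
      have := (hb gH List.mem_cons_self).2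
      omega
    simp only [List.foldl_cons]
    rw [PySem.List.pyGetD_of_nonneg bs false hg0, PySem.List.pySetD_of_nonneg bs _ hg0]
    have hcnt : ((bs.countP id : Nat) : Int) + (if (!(bs.getD gH.toNat false)) then 1 else -1)
        = (((bs.set gH.toNat (!(bs.getD gH.toNat false))).countP id : Nat) : Int) := by
      rw [countP_set_int _ bs gH.toNat hgn]
      cases hv : bs.getD gH.toNat false
      · simp
      · simp
        omega
    rw [hcnt]
    rw [show tglF (gH :: t) bs = tglF t (bs.set gH.toNat (!(bs.getD gH.toNat false))) from rfl]
    exact ih _ (List.Nodup.of_cons hnd) (fun gi hgi => by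
      have := hb gi (List.mem_cons_of_mem _ hgi)
      exact ⟨this.1, by rw [List.length_set]; exact this.2⟩)

-- a single synchronised step of the two folds
theorem step_eq (minX c : Int) (hc : minX ≤ c) (sal : List (List (Int × Int)))
    (bl : List (Int × Int)) (acc : List Int) :
    stepB (togD sal) (bXs bl)
        (sal.map (fun g => Pb minX (c - 1) g),
          ((sal.countP (fun g => Pb minX (c - 1) g) : Nat) : Int), acc) c
      = (sal.map (fun g => Pb minX c g),
          ((sal.countP (fun g => Pb minX c g) : Nat) : Int), stepA minX sal bl acc c) := by
  unfold stepB
  rw [gis_char sal c]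
  have hnd : ((PySem.List.pyRange 0 (sal.length : Int) 1).filter
      (fun j => togAt c (PySem.List.pyGetD sal j []))).Nodup :=
    List.Nodup.filter _ (PySem.List.nodup_pyRange_one 0 _)
  have hbnd : ∀ gi ∈ (PySem.List.pyRange 0 (sal.length : Int) 1).filter
      (fun j => togAt c (PySem.List.pyGetD sal j [])),
      0 ≤ gi ∧ gi < ((sal.map (fun g => Pb minX (c - 1) g)).length : Int) := by
    intro gi hgi
    rw [List.mem_filter] at hgi
    have := PySem.List.mem_pyRange_one.mp hgi.1
    rw [List.length_map]
    exact ⟨this.1, this.2⟩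
  have hid : ((sal.map (fun g => Pb minX (c - 1) g)).countP id)
      = sal.countP (fun g => Pb minX (c - 1) g) := by
    rw [List.countP_map]
    rfl
  rw [← hid, F_spec _ _ hnd hbnd]
  have hT : tglF ((PySem.List.pyRange 0 (sal.length : Int) 1).filter
        (fun j => togAt c (PySem.List.pyGetD sal j [])))
        (sal.map (fun g => Pb minX (c - 1) g))
      = sal.map (fun g => Pb minX c g) := by
    apply List.ext_getElem
    · rw [length_tglF, List.length_map, List.length_map]
    · intro i h1 h2
      rw [getElem_tglF _ _ i h1 hnd hbnd]
      have hi : i < sal.length := by simpa using h2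
      have hgd : (sal.map (fun g => Pb minX (c - 1) g)).getD i false
          = Pb minX (c - 1) sal[i] := by
        rw [List.getD_eq_getElem _ _ (by simpa using hi), List.getElem_map]
      have hpy : PySem.List.pyGetD sal ((i : Nat) : Int) [] = sal[i] := by
        rw [PySem.List.pyGetD_eq_getElem sal [] (by omega) (by exact_mod_cast hi)]
        simp
      have hmem : (((i : Nat) : Int) ∈ (PySem.List.pyRange 0 (sal.length : Int) 1).filter
          (fun j => togAt c (PySem.List.pyGetD sal j []))) ↔ togAt c sal[i] = true := by
        rw [List.mem_filter]
        constructor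
        · intro hx
          rw [← hpy]
          exact hx.2
        · intro hx
          refine ⟨PySem.List.mem_pyRange_one.mpr ⟨by omega, by exact_mod_cast hi⟩, ?_⟩
          rw [hpy]
          exact hx
      rw [hgd, List.getElem_map, Pb_step minX c hc sal[i]]
      by_cases htog : togAt c sal[i] = true
      · rw [if_pos (hmem.mpr htog), if_pos htog]
      · rw [if_neg (fun hx => htog (hmem.mp hx)), if_neg (fun hx => htog hx)]
  rw [hT]
  have hid2 : ((sal.map (fun g => Pb minX c g)).countP id)
      = sal.countP (fun g => Pb minX c g) := by
    rw [List.countP_map]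
    rfl
  rw [hid2]
  have hcond : (if decide (0 < ((sal.countP (fun g => Pb minX c g) : Nat) : Int))
        && !(PySem.Set.contains (bXs bl) c) then acc ++ [c] else acc)
      = stepA minX sal bl acc c := by
    rw [beacon_contains_eq]
    have hpos : decide (0 < ((sal.countP (fun g => Pb minX c g) : Nat) : Int))
        = sal.any (fun g => Pb minX c g) := by
      cases hA : sal.any (fun g => Pb minX c g)
      · have hz : sal.countP (fun g => Pb minX c g) = 0 :=
          List.countP_eq_zero.mpr (List.any_eq_false.mp hA)
        rw [hz]
        simp
      · obtain ⟨g, hgmem, hgp⟩ := List.any_eq_true.mp hA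
        have hz : ¬ sal.countP (fun g => Pb minX c g) = 0 := by
          intro hzz
          exact (List.countP_eq_zero.mp hzz g hgmem) hgp
        rw [decide_eq_true (by omega : (0 : Int) < ((sal.countP (fun g => Pb minX c g) : Nat) : Int))]
    rw [hpos]
    unfold stepA
    simp only []
    rw [condA_eq]
    cases hB : decide ((c, (10 : Int)) ∈ bl) <;> cases hA : sal.any (fun g => Pb minX c g) <;>
      simp
  show (sal.map (fun g => Pb minX c g), ((sal.countP (fun g => Pb minX c g) : Nat) : Int),
      if decide (0 < ((sal.countP (fun g => Pb minX c g) : Nat) : Int))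
          && !(PySem.Set.contains (bXs bl) c) then acc ++ [c] else acc)
    = (sal.map (fun g => Pb minX c g), ((sal.countP (fun g => Pb minX c g) : Nat) : Int),
        stepA minX sal bl acc c)
  rw [hcond]

-- the parity bits start out all false (the window is empty before minX)
theorem Pb_init (minX : Int) (g : List (Int × Int)) : Pb minX (minX - 1) g = false := by
  unfold Pb cntW
  rw [List.countP_eq_zero.mpr]
  · rfl
  · intro p _
    simp only [decide_eq_true_eq]
    omega

-- synchronised induction over the swept range
theorem main_fold (minX : Int) (sal : List (List (Int × Int))) (bl : List (Int × Int)) :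
    ∀ (n : Nat) (acc : List Int),
      (PySem.List.pyRange minX (minX + (n : Int)) 1).foldl (stepB (togD sal) (bXs bl))
          (sal.map (fun g => Pb minX (minX - 1) g),
            ((sal.countP (fun g => Pb minX (minX - 1) g) : Nat) : Int), acc)
        = (sal.map (fun g => Pb minX (minX + (n : Int) - 1) g),
            ((sal.countP (fun g => Pb minX (minX + (n : Int) - 1) g) : Nat) : Int),
            (PySem.List.pyRange minX (minX + (n : Int)) 1).foldl (stepA minX sal bl) acc) := by
  intro n
  induction n with
  | zero =>
    intro acc
    rw [show minX + ((0 : Nat) : Int) = minX by push_cast; ring]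
    rw [PySem.List.pyRange_one_eq_nil (le_refl minX)]
    simp
  | succ m ih =>
    intro acc
    have hsplit : minX + ((m + 1 : Nat) : Int) = (minX + (m : Int)) + 1 := by push_cast; ring
    rw [hsplit, PySem.List.pyRange_one_succ_right (by omega : minX ≤ minX + (m : Int))]
    rw [List.foldl_append, List.foldl_append, ih acc]
    simp only [List.foldl_cons, List.foldl_nil]
    rw [show minX + (m : Int) + 1 - 1 = minX + (m : Int) by ring]
    exact step_eq minX (minX + (m : Int)) (by omega) sal bl _

-- ===== VERDICT (by name: the statement is the Claim_ definition above) =====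
theorem getIntersectsForAllPointsInLine_spec : Claim_equal_getIntersectsForAllPointsInLine := by
  intro minX maxX sensorAreaLines beaconLocations _dom
  unfold Spec_getIntersectsForAllPointsInLine
  show (PySem.List.pyRange minX maxX 1).foldl (stepA minX sensorAreaLines beaconLocations) []
    = ((PySem.List.pyRange minX maxX 1).foldl (stepB (togD sensorAreaLines) (bXs beaconLocations))
        (List.replicate sensorAreaLines.length false, (0 : Int), ([] : List Int))).2.2
  have hinit : (List.replicate sensorAreaLines.length false : List Bool)
      = sensorAreaLines.map (fun g => Pb minX (minX - 1) g) := by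
    rw [← List.map_const']
    apply List.map_congr_left
    intro g _
    exact (Pb_init minX g).symm
  have hcnt : (0 : Int)
      = ((sensorAreaLines.countP (fun g => Pb minX (minX - 1) g) : Nat) : Int) := by
    rw [List.countP_eq_zero.mpr (fun g _ => by simp [Pb_init])]
    rfl
  rw [hinit, hcnt]
  by_cases h : maxX ≤ minX
  · rw [PySem.List.pyRange_one_eq_nil h]
    rfl
  · have hmax : maxX = minX + (((maxX - minX).toNat : Nat) : Int) := by
      have := Int.toNat_of_nonneg (by omega : (0:Int) ≤ maxX - minX)
      omega
    rw [hmax, main_fold minX sensorAreaLines beaconLocations (maxX - minX).toNat []]
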